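-- pv_equiv track=rewrite | github.com/eskarpnes/hill-cipher-breaker | breaker.py | convert_text_to_digrams
-- ===== SOURCE A (Python) =====
-- def convert_text_to_digrams(text):
--     digram_list = []
--     digram = ""
--     for index in range(len(text)):
--         digram += text[index]
--         if (index + 1) % 2 == 0:
--             digram_list.append(digram)
--             digram = ""
--         if index == len(text) - 1 and digram != "":
--             digram += "z"
--             digram_list.append(digram)
--     return digram_list
-- ===== SOURCE B (Python) =====
-- def convert_text_to_digrams(text):
--     digrams = []
--     rest = text
--     while rest:
--         pair, rest = rest[:2], rest[2:]
--         digrams.append(pair if len(pair) == 2 else pair + "z")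
--     return digrams
-- ===== Notes on version B (the rewrite author's own statement) =====
-- stated objective: simpler
-- what changed: Replaced A's per-character accumulation with its parity check and end-of-string guard by a head-consuming loop that slices two characters off the front at a time and pads a final single character.
import Mathlib
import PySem

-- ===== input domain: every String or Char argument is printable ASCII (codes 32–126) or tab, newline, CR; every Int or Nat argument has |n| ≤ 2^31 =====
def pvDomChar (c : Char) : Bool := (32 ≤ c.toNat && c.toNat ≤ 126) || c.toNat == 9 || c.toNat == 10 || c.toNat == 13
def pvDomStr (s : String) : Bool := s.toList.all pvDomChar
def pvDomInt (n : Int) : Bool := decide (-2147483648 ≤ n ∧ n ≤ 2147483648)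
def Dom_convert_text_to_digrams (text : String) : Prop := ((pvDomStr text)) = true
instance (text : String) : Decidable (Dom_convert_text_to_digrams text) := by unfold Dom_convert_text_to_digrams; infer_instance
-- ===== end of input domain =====

-- B replaces A's per-character accumulator (with parity check and end guard) by a loop that
-- slices two characters off the front at a time, padding a final single character; objective: simpler.

-- ===== PORT A =====
-- 'for index in range(len(text)): … text[index] …' ported as a fold over the enumerated
-- character list (same (index, text[index]) pairs, index starting at 0); digrams kept as
-- List Char and turned into String at the end (Lean's own String ops are opaque to the kernel).
def convert_text_to_digrams (text : String) : List String :=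
  let cs := text.toList
  let n : Int := cs.length
  let st := (PySem.List.enumerate cs 0).foldl
    (fun (st : List (List Char) × List Char) p =>
      let digram := st.2 ++ [p.2]
      let st' : List (List Char) × List Char :=
        if PySem.Int.mod (p.1 + 1) 2 == 0 then (st.1 ++ [digram], []) else (st.1, digram)
      if p.1 == n - 1 && st'.2 ≠ [] then (st'.1 ++ [st'.2 ++ ['z']], st'.2 ++ ['z']) else st')
    ([], [])
  st.1.map String.ofList

-- ===== PORT B =====
-- B's while loop: pair, rest = rest[:2], rest[2:]; recursion on the remaining characters.
def pvAltLoop (cs : List Char) (acc : List (List Char)) : List (List Char) :=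
  match cs with
  | [] => acc
  | c :: t =>
      let pair := PySem.List.slice (c :: t) none (some 2)
      let rest := PySem.List.slice (c :: t) (some 2) none
      pvAltLoop rest (acc ++ [if pair.length == 2 then pair else pair ++ ['z']])
termination_by cs.length
decreasing_by simp [PySem.List.slice_from]

def convert_text_to_digrams_alt (text : String) : List String :=
  (pvAltLoop text.toList []).map String.ofList

-- ===== PRECONDITION & SPEC =====
def Spec_convert_text_to_digrams (text : String) (out : List String) : Prop := out = convert_text_to_digrams_alt text
instance (text : String) (out : List String) : Decidable (Spec_convert_text_to_digrams text out) := by unfold Spec_convert_text_to_digrams; infer_instance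

-- ===== CLAIM (what is proved, stated in full; the proofs are below) =====
def Claim_equal_convert_text_to_digrams : Prop := ∀ (text : String), Dom_convert_text_to_digrams text → Spec_convert_text_to_digrams text (convert_text_to_digrams text)

-- ===== LEMMAS AND PROOFS =====

-- reference: the digram list, two characters at a time
def pvPairs : List Char → List (List Char)
  | [] => []
  | [a] => [[a, 'z']]
  | a :: b :: rest => [a, b] :: pvPairs rest

lemma pvAltLoop_eq (cs : List Char) : ∀ acc, pvAltLoop cs acc = acc ++ pvPairs cs := by
  induction cs using pvPairs.induct with
  | case1 => intro acc; rw [pvAltLoop.eq_def]; simp [pvPairs]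
  | case2 a =>
      intro acc
      rw [pvAltLoop.eq_def]
      simp [pvPairs, PySem.List.slice_to, PySem.List.slice_from, pvAltLoop]
  | case3 a b rest ih =>
      intro acc
      rw [pvAltLoop.eq_def]
      simp [PySem.List.slice_to, PySem.List.slice_from, ih, pvPairs]

-- A's loop, peeled two characters at a time: starting at an even index with an empty digram,
-- the remaining fold appends exactly pvPairs of the remaining characters.
lemma pvALoop_eq (cs : List Char) : ∀ (n i : Int) (acc : List (List Char)),
    i % 2 = 0 → i + cs.length = n →
    ((PySem.List.enumerate cs i).foldl
      (fun (st : List (List Char) × List Char) p =>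
        let digram := st.2 ++ [p.2]
        let st' : List (List Char) × List Char :=
          if PySem.Int.mod (p.1 + 1) 2 == 0 then (st.1 ++ [digram], []) else (st.1, digram)
        if p.1 == n - 1 && st'.2 ≠ [] then (st'.1 ++ [st'.2 ++ ['z']], st'.2 ++ ['z']) else st')
      (acc, [])).1 = acc ++ pvPairs cs := by
  induction cs using pvPairs.induct with
  | case1 => intro n i acc _ _; simp [PySem.List.enumerate, pvPairs]
  | case2 a =>
      intro n i acc hpar hlen
      simp only [List.length_cons, List.length_nil] at hlen
      have hdn : ¬ ((2:Int) ∣ n) := by omega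
      have h2 : i = n - 1 := by omega
      simp [PySem.List.enumerate, pvPairs, hdn, h2]
  | case3 a b rest ih =>
      intro n i acc hpar hlen
      simp only [List.length_cons] at hlen
      have hd1 : ¬ ((2:Int) ∣ (i + 1)) := by omega
      have hd0 : ((2:Int) ∣ i) := by omega
      have h3 : ¬ (i = n - 1) := by omega
      have ih' := ih n (i + 2) (acc ++ [[a, b]]) (by omega) (by push_cast at hlen ⊢; omega)
      simp only [PySem.List.enumerate, List.foldl_cons]
      simp only [pvPairs]
      simpa [hd1, hd0, h3, show i + 1 + 1 = i + 2 from by ring] using ih'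

-- ===== VERDICT (by name: the statement is the Claim_ definition above) =====
theorem convert_text_to_digrams_spec : Claim_equal_convert_text_to_digrams := by
  intro text _
  show convert_text_to_digrams text = convert_text_to_digrams_alt text
  unfold convert_text_to_digrams convert_text_to_digrams_alt
  rw [pvAltLoop_eq]
  exact congrArg (List.map String.ofList)
    (by simpa using pvALoop_eq text.toList (text.toList.length : Int) 0 [] (by omega) (by simp))
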